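-- pv_equiv track=rewrite | github.com/bitofbing/DS | Zichong_Chen_MC.py | calculate_beta_from_RPS
-- ===== SOURCE A (Python) =====
-- def calculate_beta_from_RPS(RPS_list):
--     """
--     根据图片计算beta值：beta = 最大排列事件的基数
--     图片中明确说明：β = max(|A_ij|)
--     """
--     all_events = set()
--     for RPS in RPS_list:
--         all_events.update(RPS.keys())
--
--     if not all_events:
--         return 1
--
--     max_cardinality = max(len(event) for event in all_events)
--     return max_cardinality
-- ===== SOURCE B (Python) =====
-- def calculate_beta_from_RPS(RPS_list):
--     """
--     Sort-then-take-last: flatten every key's length into one list, sort it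
--     ascending, and return the final (largest) element; 1 if there are no keys.
--     """
--     lengths = sorted(len(key) for RPS in RPS_list for key in RPS)
--     if not lengths:
--         return 1
--     return lengths[-1]
-- ===== Notes on version B (the rewrite author's own statement) =====
-- stated objective: alternative
-- what changed: Replaced A's dedup-set-then-max-scan by a sort-then-take-last strategy: all key lengths (duplicates kept) are flattened into one list, sorted ascending, and the last element is returned; correct because the last element of an ascending sort is the maximum, and the maximum over duplicated lengths equals the maximum over the deduplicated keys.
import Mathlib
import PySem

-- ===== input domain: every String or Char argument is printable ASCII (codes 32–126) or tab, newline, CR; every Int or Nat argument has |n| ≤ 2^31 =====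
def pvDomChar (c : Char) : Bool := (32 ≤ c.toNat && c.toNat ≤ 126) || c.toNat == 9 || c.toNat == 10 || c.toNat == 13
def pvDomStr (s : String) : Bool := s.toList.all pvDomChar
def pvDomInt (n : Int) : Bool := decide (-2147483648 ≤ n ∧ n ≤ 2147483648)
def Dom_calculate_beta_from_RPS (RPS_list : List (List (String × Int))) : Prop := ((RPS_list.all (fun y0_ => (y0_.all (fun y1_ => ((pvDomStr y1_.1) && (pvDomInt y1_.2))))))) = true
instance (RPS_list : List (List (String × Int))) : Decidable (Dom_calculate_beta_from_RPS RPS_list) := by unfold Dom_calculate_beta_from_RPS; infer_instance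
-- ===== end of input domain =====

-- B replaces A's dedup-set-then-max-scan by a sort-then-take-last strategy over the
-- flattened list of key lengths (objective: alternative algorithm of similar size).


-- ===== PORT A =====
-- all_events = set(); for RPS in RPS_list: all_events.update(RPS.keys());
-- if not all_events: return 1;  return max(len(event) for event in all_events)
def calculate_beta_from_RPS (RPS_list : List (List (String × Int))) : Int :=
  let all_events : PySem.Set String :=
    RPS_list.foldl (fun s RPS => PySem.Set.update s (RPS.map Prod.fst)) PySem.Set.empty
  if all_events = [] then 1
  else
    match PySem.List.max? (all_events.map PySem.Str.len) (fun x => x) with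
    | some m => m
    | none => 1  -- unreachable: all_events is nonempty here

-- ===== PORT B =====
-- lengths = sorted(len(key) for RPS in RPS_list for key in RPS);
-- if not lengths: return 1;  return lengths[-1]
def calculate_beta_from_RPS_alt (RPS_list : List (List (String × Int))) : Int :=
  let lengths : List Int :=
    PySem.List.sorted (RPS_list.flatMap (fun RPS => RPS.map (fun kv => PySem.Str.len kv.1)))
      (fun x => x) false
  if lengths = [] then 1
  else
    match PySem.List.pyGet? lengths (-1) with
    | some v => v
    | none => 1  -- unreachable: lengths is nonempty here

-- ===== PRECONDITION & SPEC =====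
def Spec_calculate_beta_from_RPS (RPS_list : List (List (String × Int))) (out : Int) : Prop := out = calculate_beta_from_RPS_alt RPS_list
instance (RPS_list : List (List (String × Int))) (out : Int) : Decidable (Spec_calculate_beta_from_RPS RPS_list out) := by unfold Spec_calculate_beta_from_RPS; infer_instance

-- ===== CLAIM =====
def Claim_equal_calculate_beta_from_RPS : Prop := ∀ (RPS_list : List (List (String × Int))), Dom_calculate_beta_from_RPS RPS_list → Spec_calculate_beta_from_RPS RPS_list (calculate_beta_from_RPS RPS_list)

-- ===== LEMMAS AND PROOFS =====

-- A's set-building loop builds set(all keys, concatenated).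
theorem pv_setA_eq (L : List (List (String × Int))) (s : PySem.Set String) :
    L.foldl (fun s RPS => PySem.Set.update s (RPS.map Prod.fst)) s
      = PySem.Set.update s (L.flatMap (fun RPS => RPS.map Prod.fst)) := by
  induction L generalizing s with
  | nil => rfl
  | cons d t ih =>
      simp only [List.foldl_cons, List.flatMap_cons, ih]
      show _ = PySem.Set.update s (d.map Prod.fst ++ _)
      simp [PySem.Set.update, List.foldl_append]

-- last element of a (≤)-pairwise list is an upper bound
theorem pv_le_getLast? (l : List Int) (h : l.Pairwise (· ≤ ·)) :
    ∀ y ∈ l, ∀ m, l.getLast? = some m → y ≤ m := by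
  induction l with
  | nil => simp
  | cons x t ih =>
      intro y hy m hm
      cases t with
      | nil =>
          simp only [List.getLast?_singleton, Option.some.injEq] at hm
          simp only [List.mem_cons, List.not_mem_nil, or_false] at hy
          omega
      | cons a u =>
          rw [List.getLast?_cons_cons] at hm
          rcases List.mem_cons.mp hy with rfl | hyt
          · have hmem : m ∈ a :: u := List.mem_of_getLast? hm
            exact (List.pairwise_cons.mp h).1 _ hmem
          · exact ih (List.pairwise_cons.mp h).2 y hyt m hm

theorem calculate_beta_spec_aux (RPS_list : List (List (String × Int))) :
    calculate_beta_from_RPS RPS_list = calculate_beta_from_RPS_alt RPS_list := by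
  unfold calculate_beta_from_RPS calculate_beta_from_RPS_alt
  set ks : List String := RPS_list.flatMap (fun RPS => RPS.map Prod.fst) with hks
  set flat : List Int :=
    RPS_list.flatMap (fun RPS => RPS.map (fun kv => PySem.Str.len kv.1)) with hflat
  have hflat_eq : flat = ks.map PySem.Str.len := by
    rw [hflat, hks]; simp [List.map_flatMap, Function.comp_def, PySem.Str.len_eq]
  have hset : RPS_list.foldl (fun s RPS => PySem.Set.update s (RPS.map Prod.fst))
      PySem.Set.empty = PySem.Set.ofList ks := by
    rw [pv_setA_eq]; rfl
  simp only [hset]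
  set srt : List Int := PySem.List.sorted flat (fun x => x) false with hsrt
  have hperm : srt.Perm flat := PySem.List.sorted_perm _ _ _
  by_cases hksnil : ks = []
  · -- no keys: both return 1
    have hfnil : flat = [] := by simp [hflat_eq, hksnil]
    have hsnil : srt = [] := List.Perm.eq_nil (hfnil ▸ hperm)
    simp [hksnil, hsnil, PySem.Set.ofList]
  · -- at least one key
    have hSne : PySem.Set.ofList ks ≠ [] := by
      obtain ⟨k, hk⟩ := List.exists_mem_of_ne_nil ks hksnil
      intro h
      have := (PySem.Set.mem_ofList ks k).mpr hk
      rw [h] at this; exact List.not_mem_nil this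
    have hfne : flat ≠ [] := by
      rw [hflat_eq]
      intro h
      exact hksnil (List.map_eq_nil_iff.mp h)
    have hsne : srt ≠ [] := by
      intro h; exact hfne (List.Perm.eq_nil (List.Perm.symm (h ▸ hperm)))
    rw [if_neg hSne, if_neg hsne]
    -- membership transfer: lengths of the set ↔ the flattened length list
    have hmem : ∀ y : Int, y ∈ (PySem.Set.ofList ks).map PySem.Str.len ↔ y ∈ srt := by
      intro y
      rw [List.Perm.mem_iff hperm, hflat_eq]
      simp only [List.mem_map]
      constructor
      · rintro ⟨k, hk, rfl⟩
        exact ⟨k, (PySem.Set.mem_ofList ks k).mp hk, rfl⟩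
      · rintro ⟨k, hk, rfl⟩
        exact ⟨k, (PySem.Set.mem_ofList ks k).mpr hk, rfl⟩
    -- A side: max? is some
    have hLsne : (PySem.Set.ofList ks).map PySem.Str.len ≠ [] := by simp [hSne]
    obtain ⟨m, hm⟩ : ∃ m, PySem.List.max? ((PySem.Set.ofList ks).map PySem.Str.len)
        (fun x => x) = some m := by
      cases h : PySem.List.max? ((PySem.Set.ofList ks).map PySem.Str.len) (fun x => x) with
      | none => exact absurd ((PySem.List.max?_eq_none_iff _ _).mp h) hLsne
      | some m => exact ⟨m, rfl⟩
    rw [hm]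
    -- B side: lengths[-1] = getLast
    obtain ⟨g, hg⟩ : ∃ g, srt.getLast? = some g :=
      ⟨srt.getLast hsne, List.getLast?_eq_some_getLast hsne⟩
    rw [PySem.List.pyGet?_neg_one, hg]
    -- both are the maximum of srt's elements
    have hpw : srt.Pairwise (· ≤ ·) := by
      have := PySem.List.sorted_pairwise flat (fun x => x) (κ := Int)
      simpa [hsrt] using this
    have hlast_mem : g ∈ srt := List.mem_of_getLast? hg
    have hm_mem : m ∈ srt := (hmem m).mp (PySem.List.max?_mem hm)
    have hmax := PySem.List.max?_isMax hm
    apply le_antisymm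
    · exact pv_le_getLast? srt hpw m hm_mem g hg
    · exact hmax _ ((hmem _).mpr hlast_mem)

-- ===== VERDICT =====
theorem calculate_beta_from_RPS_spec : Claim_equal_calculate_beta_from_RPS := by
  intro L _
  unfold Spec_calculate_beta_from_RPS
  exact calculate_beta_spec_aux L
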